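-- pv_equiv track=rewrite | github.com/fpt2019-slab-team/Autonomous_Vehicle_Driving | topview/gl.py | get_powered_size
-- ===== SOURCE A (Python) =====
-- def get_powered_size(size):
--     width = size[0]
--     height = size[1]
--
--     w = 1
--     h = 1
--
--     while(w < width):
--         w = w * 2
--
--     while(h < height):
--         h = h * 2
--
--     return w, h
-- ===== SOURCE B (Python) =====
-- def _np2(x):
--     return 1 if x <= 1 else 1 << (x - 1).bit_length()
--
-- def get_powered_size(size):
--     return _np2(size[0]), _np2(size[1])
-- ===== Notes on version B (the rewrite author's own statement) =====
-- stated objective: idiomatic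
-- what changed: Replaces the two doubling while-loops with a closed-form next-power-of-two helper using the bit-length formula (1 << (x-1).bit_length()), guarded by x <= 1.
import Mathlib
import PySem

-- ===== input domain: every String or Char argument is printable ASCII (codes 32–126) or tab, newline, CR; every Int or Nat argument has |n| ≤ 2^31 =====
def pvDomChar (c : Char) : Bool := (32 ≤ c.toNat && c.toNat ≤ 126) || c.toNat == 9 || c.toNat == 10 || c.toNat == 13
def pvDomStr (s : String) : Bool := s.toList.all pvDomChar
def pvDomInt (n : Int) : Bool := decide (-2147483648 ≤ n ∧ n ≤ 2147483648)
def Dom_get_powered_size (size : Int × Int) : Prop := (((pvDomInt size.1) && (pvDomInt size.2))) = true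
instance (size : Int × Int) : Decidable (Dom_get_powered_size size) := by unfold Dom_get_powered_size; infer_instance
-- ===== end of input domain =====

-- B replaces the two doubling while-loops with a closed-form bit-length helper (idiomatic, O(1) per dimension).

-- ===== PORT A =====
-- the 'while (w < width): w = w * 2' loop; the 0 < w invariant (true at the call site w = 1)
-- is carried as a hypothesis only to justify termination
def pvLoopA (width w : Int) (hw : 0 < w) : Int :=
  if h : w < width then pvLoopA width (w * 2) (by omega) else w
termination_by (width - w).toNat
decreasing_by omega

def get_powered_size (size : Int × Int) : Int × Int :=
  let width := size.1
  let height := size.2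
  (pvLoopA width 1 (by norm_num), pvLoopA height 1 (by norm_num))

-- ===== PORT B =====
-- Python's (x-1).bit_length() on the positive ints reached here (x ≥ 2) is Nat.size;
-- 1 << n is 2 ^ n
def pvNp2 (x : Int) : Int :=
  if x ≤ 1 then 1 else 2 ^ (Nat.size (x - 1).toNat)

def get_powered_size_alt (size : Int × Int) : Int × Int :=
  (pvNp2 size.1, pvNp2 size.2)

-- ===== PRECONDITION & SPEC =====
def Spec_get_powered_size (size : Int × Int) (out : Int × Int) : Prop := out = get_powered_size_alt size
instance (size : Int × Int) (out : Int × Int) : Decidable (Spec_get_powered_size size out) := by unfold Spec_get_powered_size; infer_instance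

-- ===== CLAIM (what is proved, stated in full; the proofs are below) =====
def Claim_equal_get_powered_size : Prop := ∀ (size : Int × Int), Dom_get_powered_size size → Spec_get_powered_size size (get_powered_size size)

-- ===== LEMMAS AND PROOFS =====

-- the loop's result is w scaled by the least power of two reaching width
theorem pvLoopA_spec (width w : Int) (hw : 0 < w) :
    ∃ k : Nat, pvLoopA width w hw = w * 2 ^ k ∧ width ≤ w * 2 ^ k ∧
      (k = 0 ∨ w * 2 ^ (k - 1) < width) := by
  by_cases h : w < width
  · obtain ⟨k, he, hge, hlast⟩ := pvLoopA_spec width (w * 2) (by omega)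
    refine ⟨k + 1, ?_, ?_, ?_⟩
    · rw [pvLoopA, dif_pos h, he]; ring
    · calc width ≤ w * 2 * 2 ^ k := hge
        _ = w * 2 ^ (k + 1) := by ring
    · right
      rcases hlast with rfl | hlt
      · simpa using h
      · calc w * 2 ^ (k + 1 - 1) = w * 2 * 2 ^ (k - 1) := by
              rw [Nat.add_sub_cancel]
              rcases Nat.exists_eq_succ_of_ne_zero (show k ≠ 0 by rintro rfl; simp at hlt; omega) with ⟨m, rfl⟩
              simp [pow_succ]; ring
          _ < width := hlt
  · exact ⟨0, by rw [pvLoopA, dif_neg h]; ring_nf, by omega, Or.inl rfl⟩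
termination_by (width - w).toNat
decreasing_by omega

theorem pvLoopA_eq_np2 (width : Int) : pvLoopA width 1 (by norm_num) = pvNp2 width := by
  obtain ⟨k, he, hge, hlast⟩ := pvLoopA_spec width 1 (by norm_num)
  simp only [one_mul] at he hge hlast
  unfold pvNp2
  by_cases hle : width ≤ 1
  · rw [if_pos hle, he]
    rcases hlast with rfl | hlt
    · simp
    · exfalso
      have : (1:Int) ≤ 2 ^ (k - 1) := one_le_pow₀ (by norm_num)
      omega
  · rw [if_neg hle, he]
    replace hle : 1 < width := by omega
    -- width ≥ 2; let s = Nat.size (width-1).toNat, with 2^(s-1) < width ≤ 2^s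
    set m : Nat := (width - 1).toNat with hm
    have hm1 : 1 ≤ m := by omega
    set s : Nat := Nat.size m with hs
    have hs1 : 1 ≤ s := by
      rw [hs, Nat.one_le_iff_ne_zero, Ne, Nat.size_eq_zero]; omega
    have hub : m < 2 ^ s := Nat.lt_size_self m
    have hlb : 2 ^ (s - 1) ≤ m := by
      rw [← Nat.lt_size]; omega
    -- k ≠ 0 since width ≥ 2 > 1 = 2^0 would contradict hge
    have hk1 : 1 ≤ k := by
      rcases Nat.eq_zero_or_pos k with rfl | h; · simp at hge; omega
      · exact h
    have hlt : 2 ^ (k - 1) < width := by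
      rcases hlast with rfl | h; · omega
      · exact h
    -- transfer the Nat bounds on m to Int bounds on width
    have hubI : width ≤ (2:Int) ^ s := by
      have := hub
      have : (m:Int) < (2:Int) ^ s := by exact_mod_cast this
      omega
    have hlbI : (2:Int) ^ (s - 1) < width := by
      have : ((2:Nat) ^ (s - 1) : Int) ≤ (m:Int) := by exact_mod_cast hlb
      push_cast at this
      omega
    -- uniqueness: k = s
    congr 1
    by_contra hne
    rcases Nat.lt_or_ge k s with hks | hks
    · have : (2:Int) ^ k ≤ 2 ^ (s - 1) := pow_le_pow_right₀ (by norm_num) (by omega)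
      omega
    · have hsk : s < k := by omega
      have : (2:Int) ^ s ≤ 2 ^ (k - 1) := pow_le_pow_right₀ (by norm_num) (by omega)
      omega

-- ===== VERDICT (by name: the statement is the Claim_ definition above) =====
theorem get_powered_size_spec : Claim_equal_get_powered_size := by
  intro size _
  unfold Spec_get_powered_size get_powered_size get_powered_size_alt
  simp [pvLoopA_eq_np2]
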